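-- pv_equiv track=rewrite | github.com/ofelix60/leet | sowpods_III/06.sowpods.py | find_longest_letter_chain
-- ===== SOURCE A (Python) =====
-- def contains_all_letters(word, letters, cache):
--     key = (word, "".join(sorted(letters)))
--     if key in cache:
--         return cache[key]
--     if len(word) < len(letters):
--         cache[key] = False
--         return False
--     for letter in letters:
--         if letter not in word:
--             cache[key] = False
--             return False
--     cache[key] = True
--     return True
--
-- def has_word_using_all_letters(letters, words_array, cache):
--     key = ("".join(sorted(letters)), tuple(words_array))
--     if key in cache:
--         return cache[key]
--     for word in words_array:
--         if contains_all_letters(word, letters, cache):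
--             cache[key] = True
--             return True
--     cache[key] = False
--     return False
--
-- def get_subarray(array, start_index, length):
--     return array[start_index : start_index + length]
--
-- def find_longest_letter_chain(alphabet, words):
--     cache = {}
--     start_index = 0
--     length = 1
--     longest_chain = None
--     while start_index + length <= len(alphabet):
--         if not has_word_using_all_letters(get_subarray(alphabet, start_index, length), words, cache):
--             start_index += 1
--         else:
--             longest_chain = get_subarray(alphabet, start_index, length)
--             start_index = 0
--             length += 1
--     return longest_chain
-- ===== SOURCE B (Python) =====
-- def find_longest_letter_chain(alphabet, words):
--     # One pass per word: mark which alphabet positions are present in the word and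
--     # track the longest run of consecutive present positions (a run is capped at
--     # len(word), since a window longer than the word can never be contained in it);
--     # keep the overall (longest, then leftmost) window.
--     best_len, best_start = 0, 0
--     for word in words:
--         chars = set(word)
--         cap = len(word)
--         run = 0
--         for i, ch in enumerate(alphabet):
--             if ch in chars:
--                 run += 1
--                 eff = min(run, cap)
--                 start = i + 1 - run
--                 if eff > best_len or (eff == best_len and start < best_start):
--                     best_len, best_start = eff, start
--             else:
--                 run = 0
--     if best_len == 0:
--         return None
--     return alphabet[best_start:best_start + best_len]
-- ===== Notes on version B (the rewrite author's own statement) =====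
-- stated objective: faster
-- what changed: Replaces the restart-and-rescan of every alphabet window with a memo dict by a single pass per word that marks which alphabet positions the word covers and tracks the longest (then leftmost) run of consecutive covered positions, capped at the word's length.
import Mathlib
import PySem

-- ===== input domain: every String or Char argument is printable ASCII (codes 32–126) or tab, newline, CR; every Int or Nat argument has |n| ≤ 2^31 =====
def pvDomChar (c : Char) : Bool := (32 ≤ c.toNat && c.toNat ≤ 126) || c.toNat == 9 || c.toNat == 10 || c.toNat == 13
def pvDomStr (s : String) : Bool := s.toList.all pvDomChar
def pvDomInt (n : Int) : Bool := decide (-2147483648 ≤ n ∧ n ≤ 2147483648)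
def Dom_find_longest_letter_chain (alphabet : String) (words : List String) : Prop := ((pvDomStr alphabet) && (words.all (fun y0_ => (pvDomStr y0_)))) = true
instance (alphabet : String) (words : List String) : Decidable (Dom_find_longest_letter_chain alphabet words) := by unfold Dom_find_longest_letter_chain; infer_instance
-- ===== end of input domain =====

-- B replaces A's restart-and-rescan over all alphabet windows (with a memo dict) by one
-- linear pass per word over the alphabet tracking runs of covered positions; faster.

-- ===== PORT A =====

-- Python's cache holds two kinds of keys: (word, "".join(sorted(letters))) : (str, str)
-- and ("".join(sorted(letters)), tuple(words)) : (str, tuple); the two kinds never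
-- compare equal in Python, so they are the two constructors of one key type here.
inductive PvCKey where
  | c : List Char → List Char → PvCKey
  | h : List Char → List String → PvCKey
deriving DecidableEq, Repr

-- "".join(sorted(letters)) (kept as a list of chars; a str is its list of chars)
def pvSortedChars (l : List Char) : List Char := PySem.List.sorted l (fun c => c) false

-- the 'for letter in letters' loop of contains_all_letters ('letter not in word' is a
-- one-character substring test, exactly character membership)
def pvContainsLoop (word : List Char) (cache : PySem.Dict PvCKey Bool) (key : PvCKey) :
    List Char → Bool × PySem.Dict PvCKey Bool
  | [] => (true, cache.insert key true)
  | letter :: rest =>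
    if !(word.contains letter) then (false, cache.insert key false)
    else pvContainsLoop word cache key rest

def pvContainsAll (word letters : List Char) (cache : PySem.Dict PvCKey Bool) :
    Bool × PySem.Dict PvCKey Bool :=
  let key := PvCKey.c word (pvSortedChars letters)
  match cache.get? key with
  | some v => (v, cache)
  | none =>
    if word.length < letters.length then (false, cache.insert key false)
    else pvContainsLoop word cache key letters

-- the 'for word in words_array' loop of has_word_using_all_letters
def pvHasLoop (letters : List Char) (key : PvCKey) :
    List String → PySem.Dict PvCKey Bool → Bool × PySem.Dict PvCKey Bool
  | [], cache => (false, cache.insert key false)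
  | w :: ws, cache =>
    let r := pvContainsAll w.toList letters cache
    if r.1 then (true, r.2.insert key true) else pvHasLoop letters key ws r.2

def pvHasWord (letters : List Char) (wordsArray : List String) (cache : PySem.Dict PvCKey Bool) :
    Bool × PySem.Dict PvCKey Bool :=
  let key := PvCKey.h (pvSortedChars letters) wordsArray
  match cache.get? key with
  | some v => (v, cache)
  | none => pvHasLoop letters key wordsArray cache

-- array[start_index : start_index + length]; start_index and length are nonnegative
-- ints in Python (start at 0/1, only ever incremented), kept as Nat
def pvGetSubarray (array : List Char) (start len : Nat) : List Char :=
  PySem.List.slice array (some (start : Int)) (some ((start : Int) + (len : Int)))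

-- the while loop of find_longest_letter_chain; 'length' = lenM1 + 1 (starts at 1,
-- only ever incremented)
def pvChainLoop (al : List Char) (words : List String) :
    PySem.Dict PvCKey Bool → Nat → Nat → Option (List Char) → Option (List Char)
  | cache, start, lenM1, longest =>
    if h : start + (lenM1 + 1) ≤ al.length then
      let sub := pvGetSubarray al start (lenM1 + 1)
      let r := pvHasWord sub words cache
      if r.1 then pvChainLoop al words r.2 0 (lenM1 + 1) (some sub)
      else pvChainLoop al words r.2 (start + 1) lenM1 longest
    else longest
  termination_by _ start lenM1 _ => (al.length + 1 - lenM1, al.length - start)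
  decreasing_by
  · left; omega
  · right; omega

def find_longest_letter_chain (alphabet : String) (words : List String) : Option String :=
  (pvChainLoop alphabet.toList words PySem.Dict.empty 0 0 none).map String.ofList

-- ===== PORT B =====

-- the 'for i, ch in enumerate(alphabet)' loop of B, carrying (i, run, best);
-- i + 1 - run' is Nat subtraction, safe since run' ≤ i + 1 by construction
def pvScan (chars : PySem.Set Char) (cap : Nat) :
    List Char → Nat → Nat → Nat × Nat → Nat × Nat
  | [], _, _, best => best
  | ch :: rest, i, run, best =>
    if PySem.Set.contains chars ch then
      let run' := run + 1
      let eff := min run' cap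
      let start := i + 1 - run'
      let best' := if eff > best.1 ∨ (eff = best.1 ∧ start < best.2) then (eff, start) else best
      pvScan chars cap rest (i + 1) run' best'
    else pvScan chars cap rest (i + 1) 0 best

-- the 'for word in words' loop of B
def pvBestFold (al : List Char) (words : List String) : Nat × Nat :=
  words.foldl (fun best w => pvScan (PySem.Set.ofList w.toList) w.toList.length al 0 0 best) (0, 0)

def find_longest_letter_chain_alt (alphabet : String) (words : List String) : Option String :=
  let best := pvBestFold alphabet.toList words
  if best.1 = 0 then none
  else some (String.ofList (PySem.List.slice alphabet.toList (some (best.2 : Int))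
    (some ((best.2 : Int) + (best.1 : Int)))))

-- ===== PRECONDITION & SPEC =====
def Spec_find_longest_letter_chain (alphabet : String) (words : List String) (out : Option String) : Prop := out = find_longest_letter_chain_alt alphabet words
instance (alphabet : String) (words : List String) (out : Option String) : Decidable (Spec_find_longest_letter_chain alphabet words out) := by unfold Spec_find_longest_letter_chain; infer_instance

-- ===== CLAIM (what is proved, stated in full; the proofs are below) =====
def Claim_equal_find_longest_letter_chain : Prop := ∀ (alphabet : String) (words : List String), Dom_find_longest_letter_chain alphabet words → Spec_find_longest_letter_chain alphabet words (find_longest_letter_chain alphabet words)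

-- ===== LEMMAS AND PROOFS =====

-- `w` contains every letter of `lt` and is at least as long (what contains_all_letters decides)
def pvCSpec (w lt : List Char) : Bool := decide (lt.length ≤ w.length) && lt.all (w.contains ·)

-- the pure value each cache key stores
def pvKeySpec (words : List String) : PvCKey → Bool
  | .c w slt => pvCSpec w slt
  | .h slt _ => words.any (fun w => pvCSpec w.toList slt)

-- every cached value is the pure function of its key
def pvInv (words : List String) (cache : PySem.Dict PvCKey Bool) : Prop :=
  ∀ k v, cache.get? k = some v → v = pvKeySpec words k

-- some word of `words` covers the window of length l starting at s
def pvOk (al : List Char) (words : List String) (s l : Nat) : Bool :=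
  words.any (fun w => pvCSpec w.toList ((al.drop s).take l))

-- some window of length l fits inside the alphabet and is covered
def pvFeas (al : List Char) (words : List String) (l : Nat) : Bool :=
  (List.range (al.length + 1)).any (fun s => decide (s + l ≤ al.length) && pvOk al words s l)

theorem pvFeas_iff (al : List Char) (words : List String) (l : Nat) :
    pvFeas al words l = true ↔ ∃ s, s + l ≤ al.length ∧ pvOk al words s l = true := by
  simp only [pvFeas, List.any_eq_true, List.mem_range, Bool.and_eq_true, decide_eq_true_eq]
  constructor
  · rintro ⟨s, _, hb, hok⟩; exact ⟨s, hb, hok⟩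
  · rintro ⟨s, hb, hok⟩; exact ⟨s, by omega, hb, hok⟩

-- longest feasible window length
def pvL (al : List Char) (words : List String) : Nat :=
  Nat.findGreatest (fun l => pvFeas al words l = true) al.length

-- the answer after all lengths ≤ l have been tried (A's longest_chain at level l+1)
def pvAnsUpto (al : List Char) (words : List String) (l : Nat) : Option (List Char) :=
  if h : 0 < l ∧ pvFeas al words l = true then
    some ((al.drop (Nat.find ((pvFeas_iff al words l).mp h.2))).take l)
  else none

theorem pvMemWindow {al : List Char} {s t : Nat} {c : Char} :
    c ∈ (al.drop s).take t ↔ ∃ j, s ≤ j ∧ j < s + t ∧ al[j]? = some c := by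
  rw [List.mem_iff_getElem?]
  constructor
  · rintro ⟨i, hi⟩
    rw [List.getElem?_take] at hi
    by_cases hit : i < t
    · rw [if_pos hit, List.getElem?_drop] at hi
      exact ⟨s + i, by omega, by omega, hi⟩
    · rw [if_neg hit] at hi; cases hi
  · rintro ⟨j, hs, hj, hget⟩
    refine ⟨j - s, ?_⟩
    rw [List.getElem?_take, if_pos (by omega), List.getElem?_drop]
    have hsj : s + (j - s) = j := by omega
    rw [hsj]; exact hget

theorem pvOk_succ (al : List Char) (words : List String) (s l : Nat)
    (h : pvOk al words s (l + 1) = true) : pvOk al words s l = true := by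
  simp only [pvOk, List.any_eq_true] at h ⊢
  obtain ⟨w, hw, hc⟩ := h
  refine ⟨w, hw, ?_⟩
  simp only [pvCSpec, Bool.and_eq_true, decide_eq_true_eq, List.all_eq_true] at hc ⊢
  obtain ⟨hlen, hall⟩ := hc
  constructor
  · simp only [List.length_take] at hlen ⊢; omega
  · intro c hcmem
    apply hall
    obtain ⟨j, h1, h2, h3⟩ := pvMemWindow.mp hcmem
    exact pvMemWindow.mpr ⟨j, h1, by omega, h3⟩

theorem pvOk_le (al : List Char) (words : List String) (s : Nat) {l m : Nat} (hlm : l ≤ m)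
    (h : pvOk al words s m = true) : pvOk al words s l = true := by
  induction m with
  | zero => have : l = 0 := by omega
            rw [this]; exact h
  | succ m ih =>
    rcases Nat.lt_succ_iff_lt_or_eq.mp (Nat.lt_succ_of_le hlm) with hlt | rfl
    · exact ih (by omega) (pvOk_succ al words s m h)
    · exact h

theorem pvFeas_mono (al : List Char) (words : List String) {l m : Nat} (hlm : l ≤ m)
    (h : pvFeas al words m = true) : pvFeas al words l = true := by
  rw [pvFeas_iff] at h ⊢
  obtain ⟨s, hb, hok⟩ := h
  exact ⟨s, by omega, pvOk_le al words s hlm hok⟩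

theorem pvL_eq (al : List Char) (words : List String) (m : Nat)
    (hm : m = 0 ∨ pvFeas al words m = true)
    (hfail : pvFeas al words (m + 1) = false) : pvL al words = m := by
  unfold pvL
  rw [Nat.findGreatest_eq_iff]
  refine ⟨?_, ?_, ?_⟩
  · rcases hm with rfl | hfe
    · exact Nat.zero_le _
    · obtain ⟨s, hb, -⟩ := (pvFeas_iff al words m).mp hfe; omega
  · intro hne
    rcases hm with rfl | hfe
    · exact absurd rfl hne
    · exact hfe
  · intro k hk _ hP
    have := pvFeas_mono al words (by omega : m + 1 ≤ k) hP
    rw [hfail] at this; cases this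

theorem pvInv_insert {words : List String} {cache : PySem.Dict PvCKey Bool}
    (hInv : pvInv words cache) (k : PvCKey) (v : Bool) (hv : v = pvKeySpec words k) :
    pvInv words (cache.insert k v) := by
  intro k' v' hget
  rw [PySem.Dict.get?_insert] at hget
  split_ifs at hget with hk
  · cases hget; rw [hk]; exact hv
  · exact hInv k' v' hget

theorem pvCSpec_sorted (w lt : List Char) : pvCSpec w (pvSortedChars lt) = pvCSpec w lt := by
  unfold pvCSpec pvSortedChars
  rw [PySem.List.length_sorted]
  congr 1
  rw [Bool.eq_iff_iff]
  simp only [List.all_eq_true, PySem.List.mem_sorted]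

theorem pvContainsLoop_eq (w : List Char) (cache : PySem.Dict PvCKey Bool) (key : PvCKey) :
    ∀ lt, pvContainsLoop w cache key lt =
      (lt.all (w.contains ·), cache.insert key (lt.all (w.contains ·))) := by
  intro lt
  induction lt with
  | nil => simp [pvContainsLoop]
  | cons c rest ih =>
    by_cases hc : c ∈ w
    · simp [pvContainsLoop, hc, ih]
    · simp [pvContainsLoop, hc]

theorem pvContainsAll_correct (words : List String) (w lt : List Char)
    (cache : PySem.Dict PvCKey Bool) (hInv : pvInv words cache) :
    (pvContainsAll w lt cache).1 = pvCSpec w lt ∧ pvInv words (pvContainsAll w lt cache).2 := by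
  unfold pvContainsAll
  cases hget : cache.get? (PvCKey.c w (pvSortedChars lt)) with
  | some v =>
    have hv := hInv _ v hget
    simp only [pvKeySpec] at hv
    rw [pvCSpec_sorted] at hv
    simp only [hget]
    exact ⟨hv, hInv⟩
  | none =>
    simp only [hget]
    by_cases hlen : w.length < lt.length
    · rw [if_pos hlen]
      have hfalse : pvCSpec w lt = false := by
        simp [pvCSpec, show ¬(lt.length ≤ w.length) by omega]
      refine ⟨hfalse.symm, pvInv_insert hInv _ _ ?_⟩
      simp only [pvKeySpec]
      rw [pvCSpec_sorted, hfalse]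
    · rw [if_neg hlen, pvContainsLoop_eq]
      have hspec : pvCSpec w lt = lt.all (w.contains ·) := by
        simp [pvCSpec, show lt.length ≤ w.length by omega]
      refine ⟨hspec.symm, pvInv_insert hInv _ _ ?_⟩
      simp only [pvKeySpec]
      rw [pvCSpec_sorted, hspec]

theorem pvHasLoop_correct (words : List String) (lt : List Char) (key : PvCKey) :
    ∀ (ws : List String) (cache : PySem.Dict PvCKey Bool), pvInv words cache →
      pvKeySpec words key = ws.any (fun w => pvCSpec w.toList lt) →
      (pvHasLoop lt key ws cache).1 = ws.any (fun w => pvCSpec w.toList lt) ∧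
        pvInv words (pvHasLoop lt key ws cache).2 := by
  intro ws
  induction ws with
  | nil =>
    intro cache hInv hk
    refine ⟨by simp [pvHasLoop], pvInv_insert hInv _ _ ?_⟩
    rw [hk]; simp
  | cons w ws ih =>
    intro cache hInv hk
    obtain ⟨hfst, hinv2⟩ := pvContainsAll_correct words w.toList lt cache hInv
    by_cases hb : pvCSpec w.toList lt = true
    · simp only [pvHasLoop, hfst, hb, if_true]
      refine ⟨by simp [hb], pvInv_insert hinv2 _ _ ?_⟩
      rw [hk]; simp [hb]
    · simp only [Bool.not_eq_true] at hb
      simp only [pvHasLoop, hfst, hb, Bool.false_eq_true, if_false]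
      have hk' : pvKeySpec words key = ws.any (fun w => pvCSpec w.toList lt) := by
        rw [hk]; simp [hb]
      obtain ⟨h1, h2⟩ := ih _ hinv2 hk'
      exact ⟨by rw [h1]; simp [hb], h2⟩

theorem pvHasWord_correct (words : List String) (lt : List Char)
    (cache : PySem.Dict PvCKey Bool) (hInv : pvInv words cache) :
    (pvHasWord lt words cache).1 = words.any (fun w => pvCSpec w.toList lt) ∧
      pvInv words (pvHasWord lt words cache).2 := by
  unfold pvHasWord
  cases hget : cache.get? (PvCKey.h (pvSortedChars lt) words) with
  | some v =>
    have hv := hInv _ v hget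
    simp only [pvKeySpec] at hv
    simp only [pvCSpec_sorted] at hv
    simp only [hget]
    exact ⟨hv, hInv⟩
  | none =>
    simp only [hget]
    exact pvHasLoop_correct words lt _ words cache hInv (by simp only [pvKeySpec, pvCSpec_sorted])

theorem pvSub_eq (al : List Char) (s l : Nat) :
    pvGetSubarray al s l = (al.drop s).take l := by
  unfold pvGetSubarray
  exact PySem.List.slice_natCast_add al s l

theorem pvAnsUpto_eq_some (al : List Char) (words : List String) (s l : Nat)
    (hl : 0 < l) (hb : s + l ≤ al.length) (hok : pvOk al words s l = true)
    (hmin : ∀ s' < s, pvOk al words s' l = false) :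
    pvAnsUpto al words l = some ((al.drop s).take l) := by
  have hfeas : pvFeas al words l = true := (pvFeas_iff al words l).mpr ⟨s, hb, hok⟩
  unfold pvAnsUpto
  rw [dif_pos ⟨hl, hfeas⟩]
  have hfind : Nat.find ((pvFeas_iff al words l).mp ((⟨hl, hfeas⟩ : 0 < l ∧ _).2)) = s := by
    rw [Nat.find_eq_iff]
    refine ⟨⟨hb, hok⟩, ?_⟩
    rintro m hm ⟨-, hok2⟩
    rw [hmin m hm] at hok2; cases hok2
  rw [hfind]

theorem pvChainLoop_eq (al : List Char) (words : List String)
    (cache : PySem.Dict PvCKey Bool) (start lenM1 : Nat) (longest : Option (List Char))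
    (hInv : pvInv words cache)
    (hs : ∀ s' < start, pvOk al words s' (lenM1 + 1) = false)
    (hf : lenM1 = 0 ∨ pvFeas al words lenM1 = true)
    (hl : longest = pvAnsUpto al words lenM1) :
    pvChainLoop al words cache start lenM1 longest = pvAnsUpto al words (pvL al words) := by
  revert hInv hs hf hl
  induction cache, start, lenM1, longest using pvChainLoop.induct al words with
  | case1 cache start lenM1 longest h sub r hb ih =>
    intro hInv hs hf hl
    obtain ⟨hfst, hinv2⟩ :=
      pvHasWord_correct words (pvGetSubarray al start (lenM1 + 1)) cache hInv
    have hok : pvOk al words start (lenM1 + 1) = true := by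
      rw [pvOk, ← pvSub_eq, ← hfst]; exact hb
    rw [pvChainLoop, dif_pos h, if_pos hb]
    apply ih
    · exact hinv2
    · intro s' hs'; omega
    · right
      exact (pvFeas_iff al words (lenM1 + 1)).mpr ⟨start, h, hok⟩
    · show some (pvGetSubarray al start (lenM1 + 1)) = pvAnsUpto al words (lenM1 + 1)
      rw [pvSub_eq]
      exact (pvAnsUpto_eq_some al words start (lenM1 + 1) (Nat.succ_pos _) h hok hs).symm
  | case2 cache start lenM1 longest h sub r hb ih =>
    intro hInv hs hf hl
    obtain ⟨hfst, hinv2⟩ :=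
      pvHasWord_correct words (pvGetSubarray al start (lenM1 + 1)) cache hInv
    have hok : pvOk al words start (lenM1 + 1) = false := by
      rw [pvOk, ← pvSub_eq, ← hfst]
      exact Bool.not_eq_true _ ▸ hb
    rw [pvChainLoop, dif_pos h, if_neg hb]
    apply ih hinv2 _ hf hl
    intro s' hs'
    rcases Nat.lt_succ_iff_lt_or_eq.mp hs' with hlt | rfl
    · exact hs s' hlt
    · exact hok
  | case3 cache start lenM1 longest h =>
    intro hInv hs hf hl
    rw [pvChainLoop, dif_neg h]
    have hfail : pvFeas al words (lenM1 + 1) = false := by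
      by_contra hne
      rw [Bool.not_eq_false] at hne
      obtain ⟨s, hb2, hok2⟩ := (pvFeas_iff al words (lenM1 + 1)).mp hne
      have hslt : s < start := by omega
      rw [hs s hslt] at hok2; cases hok2
    rw [pvL_eq al words lenM1 hf hfail]
    exact hl

theorem pvA_eq (alphabet : String) (words : List String) :
    find_longest_letter_chain alphabet words =
      (pvAnsUpto alphabet.toList words (pvL alphabet.toList words)).map String.ofList := by
  unfold find_longest_letter_chain
  congr 1
  apply pvChainLoop_eq
  · intro k v h
    rw [PySem.Dict.get?_empty] at h; cases h
  · intro s hs; exact absurd hs (Nat.not_lt_zero s)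
  · left; rfl
  · simp [pvAnsUpto]

-- ===== B-side =====

-- b is at least as good a window as c: longer, or as long and no further right
def pvBeats (b c : Nat × Nat) : Prop := c.1 < b.1 ∨ (c.1 = b.1 ∧ b.2 ≤ c.2)

def pvUpd (b c : Nat × Nat) : Nat × Nat :=
  if c.1 > b.1 ∨ (c.1 = b.1 ∧ c.2 < b.2) then c else b

-- the candidate windows B's inner loop proposes for one word
def pvCands (chars : PySem.Set Char) (cap : Nat) : List Char → Nat → Nat → List (Nat × Nat)
  | [], _, _ => []
  | ch :: rest, i, run =>
    if PySem.Set.contains chars ch then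
      (min (run + 1) cap, i - run) :: pvCands chars cap rest (i + 1) (run + 1)
    else pvCands chars cap rest (i + 1) 0

theorem pvBeats_refl (b : Nat × Nat) : pvBeats b b := Or.inr ⟨rfl, le_refl _⟩

theorem pvBeats_trans {a b c : Nat × Nat} (h1 : pvBeats a b) (h2 : pvBeats b c) : pvBeats a c := by
  obtain ⟨a1, a2⟩ := a; obtain ⟨b1, b2⟩ := b; obtain ⟨c1, c2⟩ := c
  simp only [pvBeats] at *
  omega

theorem pvUpd_dom_left (b c : Nat × Nat) : pvBeats (pvUpd b c) b := by
  obtain ⟨b1, b2⟩ := b; obtain ⟨c1, c2⟩ := c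
  simp only [pvUpd, pvBeats]
  split_ifs with h <;> simp_all <;> omega

theorem pvUpd_dom_right (b c : Nat × Nat) : pvBeats (pvUpd b c) c := by
  obtain ⟨b1, b2⟩ := b; obtain ⟨c1, c2⟩ := c
  simp only [pvUpd, pvBeats]
  split_ifs with h <;> simp_all <;> omega

theorem pvScan_eq_foldl (chars : PySem.Set Char) (cap : Nat) :
    ∀ (cs : List Char) (i run : Nat) (best : Nat × Nat),
      pvScan chars cap cs i run best = (pvCands chars cap cs i run).foldl pvUpd best := by
  intro cs
  induction cs with
  | nil => intro i run best; simp [pvScan, pvCands]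
  | cons ch rest ih =>
    intro i run best
    by_cases hc : PySem.Set.contains chars ch
    · simp only [pvScan, pvCands, hc, if_true, List.foldl_cons, ih, Nat.succ_sub_succ]
      rfl
    · simp only [Bool.not_eq_true] at hc
      simp only [pvScan, pvCands, hc, Bool.false_eq_true, if_false, ih]

theorem pvFoldl_upd_mem (l : List (Nat × Nat)) : ∀ b : Nat × Nat,
    l.foldl pvUpd b = b ∨ l.foldl pvUpd b ∈ l := by
  induction l with
  | nil => intro b; left; rfl
  | cons c l ih =>
    intro b
    rw [List.foldl_cons]
    rcases ih (pvUpd b c) with h | h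
    · rw [h]; unfold pvUpd; split_ifs
      · right; exact List.mem_cons_self
      · left; rfl
    · right; exact List.mem_cons_of_mem _ h

theorem pvFoldl_upd_dom (l : List (Nat × Nat)) : ∀ b : Nat × Nat,
    pvBeats (l.foldl pvUpd b) b ∧ ∀ c ∈ l, pvBeats (l.foldl pvUpd b) c := by
  induction l with
  | nil => intro b; exact ⟨pvBeats_refl b, by simp⟩
  | cons c l ih =>
    intro b
    rw [List.foldl_cons]
    obtain ⟨h1, h2⟩ := ih (pvUpd b c)
    refine ⟨pvBeats_trans h1 (pvUpd_dom_left b c), ?_⟩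
    intro c' hc'
    rcases List.mem_cons.mp hc' with rfl | hmem
    · exact pvBeats_trans h1 (pvUpd_dom_right b c')
    · exact h2 c' hmem

theorem pvCands_sound (al : List Char) (w : String) :
    ∀ (cs : List Char) (i run : Nat), cs = al.drop i → run ≤ i →
      (∀ j c, i - run ≤ j → j < i → al[j]? = some c → c ∈ w.toList) →
      ∀ p ∈ pvCands (PySem.Set.ofList w.toList) w.toList.length cs i run,
        1 ≤ p.1 ∧ p.2 + p.1 ≤ al.length ∧ pvCSpec w.toList ((al.drop p.2).take p.1) = true := by
  intro cs
  induction cs with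
  | nil => intro i run _ _ _ p hp; simp [pvCands] at hp
  | cons ch rest ih =>
    intro i run hdrop hrun hpast
    have hlen : i < al.length := by
      have := congrArg List.length hdrop
      simp only [List.length_cons, List.length_drop] at this
      omega
    have hch : al[i]? = some ch := by
      have h0 : (al.drop i)[0]? = some ch := by rw [← hdrop]; rfl
      rw [List.getElem?_drop] at h0
      simpa using h0
    have hrest : rest = al.drop (i + 1) := by
      have := congrArg List.tail hdrop
      simpa [List.tail_drop] using this
    by_cases hc : PySem.Set.contains (PySem.Set.ofList w.toList) ch
    · have hchw : ch ∈ w.toList := by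
        have := (PySem.Set.contains_iff _ _).mp hc
        rwa [PySem.Set.mem_ofList] at this
      simp only [pvCands, hc, if_true]
      intro p hp
      rcases List.mem_cons.mp hp with rfl | hp'
      · have hcap : 1 ≤ w.toList.length := List.length_pos_of_mem hchw
        have hm1 : min (run + 1) w.toList.length ≤ run + 1 := Nat.min_le_left _ _
        have hm2 : 1 ≤ min (run + 1) w.toList.length := le_min (by omega) hcap
        refine ⟨hm2, by show i - run + min (run + 1) w.toList.length ≤ al.length; omega, ?_⟩
        simp only [pvCSpec, Bool.and_eq_true, decide_eq_true_eq, List.all_eq_true]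
        constructor
        · rw [List.length_take, List.length_drop]; omega
        · intro c hcmem
          obtain ⟨j, hj1, hj2, hj3⟩ := pvMemWindow.mp hcmem
          have hji : j ≤ i := by omega
          rw [List.contains_iff_mem]
          rcases Nat.lt_or_eq_of_le hji with hlt | rfl
          · exact hpast j c (by omega) hlt hj3
          · rw [hch] at hj3; cases hj3; exact hchw
      · refine ih (i + 1) (run + 1) hrest (by omega) ?_ p hp'
        intro j c hj1 hj2 hj3
        have hji : j ≤ i := by omega
        rcases Nat.lt_or_eq_of_le hji with hlt | rfl
        · exact hpast j c (by omega) hlt hj3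
        · rw [hch] at hj3; cases hj3; exact hchw
    · simp only [Bool.not_eq_true] at hc
      simp only [pvCands, hc, Bool.false_eq_true, if_false]
      exact ih (i + 1) 0 hrest (by omega) (fun j c hj1 hj2 _ => absurd hj2 (by omega))

theorem pvCands_complete (al : List Char) (w : String) (s l : Nat)
    (hl : 1 ≤ l) (hb : s + l ≤ al.length)
    (hcov : pvCSpec w.toList ((al.drop s).take l) = true) :
    ∀ (cs : List Char) (i run : Nat), cs = al.drop i → run ≤ i → i - s ≤ run → i < s + l →
      ∃ p ∈ pvCands (PySem.Set.ofList w.toList) w.toList.length cs i run,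
        l ≤ p.1 ∧ p.2 ≤ s := by
  have hcov2 : (l ≤ w.toList.length) ∧
      ∀ j c, s ≤ j → j < s + l → al[j]? = some c → c ∈ w.toList := by
    simp only [pvCSpec, Bool.and_eq_true, decide_eq_true_eq, List.all_eq_true] at hcov
    obtain ⟨h1, h2⟩ := hcov
    constructor
    · rw [List.length_take, List.length_drop] at h1; omega
    · intro j c hj1 hj2 hj3
      have := h2 c (pvMemWindow.mpr ⟨j, hj1, hj2, hj3⟩)
      rwa [List.contains_iff_mem] at this
  obtain ⟨hcap, hcov'⟩ := hcov2
  intro cs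
  induction cs with
  | nil =>
    intro i run hdrop _ _ hil
    exfalso
    have := congrArg List.length hdrop
    simp only [List.length_nil, List.length_drop] at this
    omega
  | cons ch rest ih =>
    intro i run hdrop hrun hge hil
    have hlen : i < al.length := by omega
    have hch : al[i]? = some ch := by
      have h0 : (al.drop i)[0]? = some ch := by rw [← hdrop]; rfl
      rw [List.getElem?_drop] at h0
      simpa using h0
    have hrest : rest = al.drop (i + 1) := by
      have := congrArg List.tail hdrop
      simpa [List.tail_drop] using this
    by_cases hil2 : i + 1 < s + l
    · by_cases hc : PySem.Set.contains (PySem.Set.ofList w.toList) ch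
      · obtain ⟨p, hp, h1, h2⟩ := ih (i + 1) (run + 1) hrest (by omega) (by omega) (by omega)
        refine ⟨p, ?_, h1, h2⟩
        simp only [pvCands, hc, if_true]
        exact List.mem_cons_of_mem _ hp
      · have his : i < s := by
          by_contra hge2
          push_neg at hge2
          exact hc ((PySem.Set.contains_iff _ _).mpr
            ((PySem.Set.mem_ofList _ _).mpr (hcov' i ch hge2 (by omega) hch)))
        obtain ⟨p, hp, h1, h2⟩ := ih (i + 1) 0 hrest (by omega) (by omega) (by omega)
        refine ⟨p, ?_, h1, h2⟩
        simp only [Bool.not_eq_true] at hc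
        simp only [pvCands, hc, Bool.false_eq_true, if_false]
        exact hp
    · have hie : i + 1 = s + l := by omega
      have hsi : s ≤ i := by omega
      have hchw : ch ∈ w.toList := hcov' i ch hsi (by omega) hch
      have hc : PySem.Set.contains (PySem.Set.ofList w.toList) ch = true :=
        (PySem.Set.contains_iff _ _).mpr ((PySem.Set.mem_ofList _ _).mpr hchw)
      refine ⟨(min (run + 1) w.toList.length, i - run), ?_, le_min (by omega) hcap, by omega⟩
      simp only [pvCands, hc, if_true]
      exact List.mem_cons_self

theorem pvWordsFold_dom (al : List Char) :
    ∀ (ws : List String) (b : Nat × Nat),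
      pvBeats (ws.foldl (fun best w =>
          (pvCands (PySem.Set.ofList w.toList) w.toList.length al 0 0).foldl pvUpd best) b) b ∧
      (∀ w ∈ ws, ∀ c ∈ pvCands (PySem.Set.ofList w.toList) w.toList.length al 0 0,
        pvBeats (ws.foldl (fun best w =>
          (pvCands (PySem.Set.ofList w.toList) w.toList.length al 0 0).foldl pvUpd best) b) c) ∧
      ((ws.foldl (fun best w =>
          (pvCands (PySem.Set.ofList w.toList) w.toList.length al 0 0).foldl pvUpd best) b) = b ∨
        ∃ w ∈ ws, (ws.foldl (fun best w =>
          (pvCands (PySem.Set.ofList w.toList) w.toList.length al 0 0).foldl pvUpd best) b) ∈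
            pvCands (PySem.Set.ofList w.toList) w.toList.length al 0 0) := by
  intro ws
  induction ws with
  | nil => intro b; exact ⟨pvBeats_refl b, by simp, Or.inl rfl⟩
  | cons w ws ih =>
    intro b
    rw [List.foldl_cons]
    set b' := (pvCands (PySem.Set.ofList w.toList) w.toList.length al 0 0).foldl pvUpd b with hb'
    obtain ⟨h1, h2, h3⟩ := ih b'
    obtain ⟨g1, g2⟩ := pvFoldl_upd_dom (pvCands (PySem.Set.ofList w.toList) w.toList.length al 0 0) b
    refine ⟨pvBeats_trans h1 g1, ?_, ?_⟩
    · intro w' hw' c hc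
      rcases List.mem_cons.mp hw' with rfl | hmem
      · exact pvBeats_trans h1 (g2 c hc)
      · exact h2 w' hmem c hc
    · rcases h3 with h | ⟨w', hw', hmem⟩
      · rcases pvFoldl_upd_mem (pvCands (PySem.Set.ofList w.toList) w.toList.length al 0 0) b with h4 | h4
        · left; rw [h, hb', h4]
        · right; exact ⟨w, List.mem_cons_self, by rw [h, hb']; exact h4⟩
      · right; exact ⟨w', List.mem_cons_of_mem _ hw', hmem⟩

theorem pvBestFold_eq (al : List Char) (words : List String) :
    pvBestFold al words = words.foldl (fun best w =>
      (pvCands (PySem.Set.ofList w.toList) w.toList.length al 0 0).foldl pvUpd best) (0, 0) := by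
  unfold pvBestFold
  congr 1
  funext b w
  exact pvScan_eq_foldl _ _ al 0 0 b

theorem pvB_eq (alphabet : String) (words : List String) :
    find_longest_letter_chain_alt alphabet words =
      (pvAnsUpto alphabet.toList words (pvL alphabet.toList words)).map String.ofList := by
  simp only [find_longest_letter_chain_alt]
  set al := alphabet.toList with hal
  rw [pvBestFold_eq]
  set best := words.foldl
    (fun best w => (pvCands (PySem.Set.ofList w.toList) w.toList.length al 0 0).foldl pvUpd best)
    (0, 0) with hbest
  obtain ⟨hdom0, hdomc, hmem⟩ := pvWordsFold_dom al words (0, 0)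
  rw [← hbest] at hdom0 hdomc hmem
  have hsound : ∀ w ∈ words, ∀ p ∈ pvCands (PySem.Set.ofList w.toList) w.toList.length al 0 0,
      1 ≤ p.1 ∧ p.2 + p.1 ≤ al.length ∧ pvCSpec w.toList ((al.drop p.2).take p.1) = true :=
    fun w _ => pvCands_sound al w al 0 0 List.drop_zero.symm (le_refl 0)
      (fun j c h1 h2 _ => absurd h2 (by omega))
  have hfeas_of : ∀ w ∈ words, ∀ p ∈ pvCands (PySem.Set.ofList w.toList) w.toList.length al 0 0,
      pvFeas al words p.1 = true ∧ pvOk al words p.2 p.1 = true := by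
    intro w hw p hp
    obtain ⟨h1, h2, h3⟩ := hsound w hw p hp
    have hok : pvOk al words p.2 p.1 = true := by
      simp only [pvOk, List.any_eq_true]
      exact ⟨w, hw, h3⟩
    exact ⟨(pvFeas_iff al words p.1).mpr ⟨p.2, h2, hok⟩, hok⟩
  have hle_L : ∀ w ∈ words, ∀ p ∈ pvCands (PySem.Set.ofList w.toList) w.toList.length al 0 0,
      p.1 ≤ pvL al words := by
    intro w hw p hp
    obtain ⟨-, h2, -⟩ := hsound w hw p hp
    obtain ⟨hfe, -⟩ := hfeas_of w hw p hp
    unfold pvL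
    exact Nat.le_findGreatest (by omega) hfe
  by_cases hL : pvL al words = 0
  · have hbest0 : best = (0, 0) := by
      rcases hmem with h | ⟨w, hw, hp⟩
      · exact h
      · exfalso
        obtain ⟨h1, -, -⟩ := hsound w hw best hp
        have := hle_L w hw best hp
        omega
    rw [hbest0]
    simp only [hL, pvAnsUpto]
    rw [dif_neg (by omega)]
    rfl
  · have hLpos : 0 < pvL al words := Nat.pos_of_ne_zero hL
    have hfeasL : pvFeas al words (pvL al words) = true := by
      obtain ⟨m, hm0, hmle, hmP⟩ :=
        (Nat.findGreatest_pos (P := fun l => pvFeas al words l = true)).mp hLpos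
      exact Nat.findGreatest_spec (P := fun l => pvFeas al words l = true) hmle hmP
    have hEx := (pvFeas_iff al words (pvL al words)).mp hfeasL
    obtain ⟨hbnd, hokmin⟩ := Nat.find_spec hEx
    obtain ⟨w, hw, hcov⟩ := List.any_eq_true.mp hokmin
    obtain ⟨p, hpmem, hpl, hps⟩ := pvCands_complete al w (Nat.find hEx) (pvL al words)
      hLpos hbnd hcov al 0 0 List.drop_zero.symm (le_refl 0) (by omega) (by omega)
    have hp1 : p.1 = pvL al words := le_antisymm (hle_L w hw p hpmem) hpl
    have hDomp := hdomc w hw p hpmem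
    rcases hmem with hb0 | ⟨w', hw', hbmem⟩
    · exfalso
      rw [hb0] at hDomp
      rcases hDomp with h | ⟨h, -⟩ <;> omega
    · obtain ⟨hbs1, hbs2, -⟩ := hsound w' hw' best hbmem
      obtain ⟨hbfe, hbok⟩ := hfeas_of w' hw' best hbmem
      have hble : best.1 ≤ pvL al words := hle_L w' hw' best hbmem
      have hb1 : best.1 = pvL al words := by
        rcases hDomp with h | ⟨h, -⟩ <;> omega
      have hsmin_le : Nat.find hEx ≤ best.2 :=
        Nat.find_min' hEx ⟨by omega, by rw [← hb1]; exact hbok⟩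
      have hb2eq : best.2 = Nat.find hEx := by
        rcases hDomp with h | ⟨-, h⟩
        · omega
        · omega
      rw [if_neg (by omega)]
      rw [PySem.List.slice_natCast_add]
      have hans : pvAnsUpto al words (pvL al words) =
          some ((al.drop (Nat.find hEx)).take (pvL al words)) := by
        apply pvAnsUpto_eq_some al words (Nat.find hEx) (pvL al words) hLpos hbnd hokmin
        intro s' hs'
        by_contra hne
        rw [Bool.not_eq_false] at hne
        exact Nat.find_min hEx hs' ⟨by omega, hne⟩
      rw [hans]
      simp only [Option.map_some]
      rw [hb1, hb2eq]

-- ===== VERDICT (by name: the statement is the Claim_ definition above) =====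
theorem find_longest_letter_chain_spec : Claim_equal_find_longest_letter_chain := by
  intro alphabet words _
  unfold Spec_find_longest_letter_chain
  rw [pvA_eq, pvB_eq]
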